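-- pv_equiv track=rewrite | github.com/FERBP3/Sistema-de-Hill | hill.py | mapMessage
-- ===== SOURCE A (Python) =====
-- def mapLetter(a):
--     a = a.upper()
--     mapped = -1
--     alphabet = "ABCDEFGHIJKLMNÑOPQRSTUVWXYZ"
--     for index,letter in enumerate(alphabet):
--         if a == letter:
--             mapped = index
--     return mapped
--
-- def mapMessage(message, n):
--     ngramas = []
--     ngrama = []
--     for letter in message:
--         ngrama.append(mapLetter(letter))
--         if (len(ngrama) % n) == 0:
--             ngramas.append(ngrama)
--             ngrama = []
--     return ngramas
-- ===== SOURCE B (Python) =====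
-- def mapMessage(message, n):
--     if not message:
--         return []
--     alphabet = "ABCDEFGHIJKLMNÑOPQRSTUVWXYZ"
--     stop = len(message) // n * n
--     return [[alphabet.find(c.upper()) for c in message[i:i + n]]
--             for i in range(0, stop, n)]
-- ===== Notes on version B (the rewrite author's own statement) =====
-- stated objective: simpler
-- what changed: Replaces A's streaming accumulator (append each mapped letter, flush whenever len % n == 0) and its per-letter enumerate scan with a direct index-sliced comprehension over range(0, len//n*n, n) using str.find for the letter index.
-- intended difference: For n < 0 with |n| <= len(message), A's 'len % n == 0' test accidentally fires at multiples of |n| so A returns groups of size |n|, while B's empty range yields []; an empty result is the intended reading of a negative group size. — e.g. on mapMessage("AB", -2): A returns [[0, 1]], B returns []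
import Mathlib
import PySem

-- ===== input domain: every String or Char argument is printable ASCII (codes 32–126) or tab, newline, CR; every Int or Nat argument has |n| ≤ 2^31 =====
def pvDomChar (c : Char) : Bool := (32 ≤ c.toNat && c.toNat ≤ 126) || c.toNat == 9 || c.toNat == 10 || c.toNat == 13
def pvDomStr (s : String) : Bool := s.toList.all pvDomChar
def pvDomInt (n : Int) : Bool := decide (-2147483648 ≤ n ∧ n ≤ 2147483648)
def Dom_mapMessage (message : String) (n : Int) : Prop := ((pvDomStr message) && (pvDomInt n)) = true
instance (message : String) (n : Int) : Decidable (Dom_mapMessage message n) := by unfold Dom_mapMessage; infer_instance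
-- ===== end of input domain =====

-- B replaces A's streaming accumulator (flush on len % n == 0) and enumerate-scan letter lookup
-- by an index-sliced comprehension with str.find: a simpler decomposition of the same task.


-- ===== PORT A =====
-- mapLetter: a = a.upper(); scan enumerate(alphabet), remembering the LAST matching index, default -1
def mapLetterA (a : Char) : Int :=
  let a' := PySem.Chars.upperChar a
  let alphabet : List Char :=
    ['A','B','C','D','E','F','G','H','I','J','K','L','M','N','Ñ','O','P','Q','R','S','T','U','V','W','X','Y','Z']
  (PySem.List.enumerate alphabet).foldl (fun mapped p => if a' = p.2 then p.1 else mapped) (-1)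

def mapMessage (message : String) (n : Int) : List (List Int) :=
  (message.toList.foldl
    (fun (st : List (List Int) × List Int) letter =>
      let ngrama := st.2 ++ [mapLetterA letter]
      if PySem.Int.mod (PySem.List.len ngrama) n = 0 then (st.1 ++ [ngrama], ([] : List Int))
      else (st.1, ngrama))
    ([], [])).1

-- ===== PORT B =====
def mapMessage_alt (message : String) (n : Int) : List (List Int) :=
  let cs := message.toList
  if cs.isEmpty then []
  else
    let alphabet : List Char :=
      ['A','B','C','D','E','F','G','H','I','J','K','L','M','N','Ñ','O','P','Q','R','S','T','U','V','W','X','Y','Z']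
    let stop := PySem.Int.floordiv (PySem.List.len cs) n * n
    (PySem.List.pyRange 0 stop n).map (fun i =>
      (PySem.List.slice cs (some i) (some (i + n))).map (fun c =>
        -- alphabet.find(c.upper()): c.upper() of a single ASCII char is the one-char string [upperChar c]
        PySem.Chars.find alphabet [PySem.Chars.upperChar c]))

-- ===== PRECONDITION & SPEC =====
-- Pre_ excludes exactly the inputs where A raises ZeroDivisionError: n == 0 with a non-empty message.
def Pre_mapMessage (message : String) (n : Int) : Prop := n ≠ 0 ∨ message.toList = []
instance (message : String) (n : Int) : Decidable (Pre_mapMessage message n) := by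
  unfold Pre_mapMessage; infer_instance
def pvWitness_mapMessage : String × Int := ("HOLA", 2)

-- For n < 0 with |n| ≤ len(message), A's 'len % n == 0' test accidentally fires at multiples of |n|
-- so A returns groups of size |n|, while B's empty range yields []; an empty result is the intended
-- reading of a negative group size.
def D_mapMessage (message : String) (n : Int) : Prop :=
  n < 0 ∧ -n ≤ (message.toList.length : Int)
instance (message : String) (n : Int) : Decidable (D_mapMessage message n) := by
  unfold D_mapMessage; infer_instance

def Spec_mapMessage (message : String) (n : Int) (out : List (List Int)) : Prop :=
  ¬ D_mapMessage message n → out = mapMessage_alt message n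
instance (message : String) (n : Int) (out : List (List Int)) : Decidable (Spec_mapMessage message n out) := by
  unfold Spec_mapMessage; infer_instance

def pvDiffWitness_mapMessage : String × Int := ("AB", -2)
def pvDiffWitnessOut_mapMessage : (List (List Int)) × (List (List Int)) := ([[0, 1]], [])

-- ===== CLAIM (what is proved, stated in full; the proofs are below) =====
def Claim_unchanged_mapMessage : Prop := ∀ (message : String) (n : Int), Dom_mapMessage message n → Pre_mapMessage message n → Spec_mapMessage message n (mapMessage message n)
def Claim_changed_mapMessage : Prop := Dom_mapMessage (pvDiffWitness_mapMessage.1) (pvDiffWitness_mapMessage.2) ∧ Pre_mapMessage (pvDiffWitness_mapMessage.1) (pvDiffWitness_mapMessage.2) ∧ D_mapMessage (pvDiffWitness_mapMessage.1) (pvDiffWitness_mapMessage.2) ∧ mapMessage (pvDiffWitness_mapMessage.1) (pvDiffWitness_mapMessage.2) = pvDiffWitnessOut_mapMessage.1 ∧ mapMessage_alt (pvDiffWitness_mapMessage.1) (pvDiffWitness_mapMessage.2) = pvDiffWitnessOut_mapMessage.2 ∧ pvDiffWitnessOut_mapMessage.1 ≠ pvDiffWitnessOut_mapMessage.2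
def Claim_exact_mapMessage : Prop := ∀ (message : String) (n : Int), Dom_mapMessage message n → Pre_mapMessage message n → D_mapMessage message n → mapMessage message n ≠ mapMessage_alt message n

-- ===== LEMMAS AND PROOFS =====

-- A's scan ignores entries whose letter never matches.
lemma foldl_no_match (u : Char) (t : List Char) (k : Int) (init : Int) (h : u ∉ t) :
    (PySem.List.enumerate t k).foldl (fun m p => if u = p.2 then p.1 else m) init = init := by
  induction t generalizing k init with
  | nil => simp [PySem.List.enumerate_nil]
  | cons x t ih =>
    simp only [PySem.List.enumerate_cons, List.foldl_cons]
    have hx : u ≠ x := by simp_all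
    rw [if_neg hx]
    exact ih _ _ (by simp_all)

-- On a duplicate-free list, A's keep-the-last-match scan lands on the unique index of u.
lemma last_match (u : Char) (l : List Char) (hl : l.Nodup) (k : Int) (init : Int) :
    (PySem.List.enumerate l k).foldl (fun m p => if u = p.2 then p.1 else m) init
      = if u ∈ l then k + l.idxOf u else init := by
  induction l generalizing k init with
  | nil => simp [PySem.List.enumerate_nil]
  | cons x t ih =>
    simp only [PySem.List.enumerate_cons, List.foldl_cons]
    by_cases hx : u = x
    · subst hx
      rw [if_pos rfl, foldl_no_match u t _ _ (by simp_all)]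
      simp [List.idxOf_cons_self]
    · rw [if_neg hx, ih (by simp_all) (k+1) init]
      by_cases hm : u ∈ t
      · simp [hm, hx, Ne.symm hx]
        ring
      · simp [hm, hx]

-- str.find for a one-character needle is the first index of u, or -1.
lemma find_go_singleton (u : Char) (l : List Char) (k : Nat) :
    PySem.Chars.find.go [u] l k = if u ∈ l then (k : Int) + l.idxOf u else -1 := by
  induction l generalizing k with
  | nil => simp [PySem.Chars.find.go]
  | cons x t ih =>
    rw [PySem.Chars.find.go]
    by_cases hx : u = x
    · subst hx; simp [List.isPrefixOf]
    · have hpre : ([u].isPrefixOf (x :: t)) = false := by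
        simp [List.isPrefixOf, hx]
      rw [hpre]
      simp only [Bool.false_eq_true, if_false, ih (k+1)]
      by_cases hm : u ∈ t
      · simp [hm, hx, Ne.symm hx]
        ring
      · simp [hm, hx]

-- A's letter lookup equals B's: the alphabet has no repeated letters, so the last match of A's
-- scan is the first occurrence find reports, and both default to -1.
lemma mapLetter_eq_find (a : Char) :
    mapLetterA a =
      PySem.Chars.find
        ['A','B','C','D','E','F','G','H','I','J','K','L','M','N','Ñ','O','P','Q','R','S','T','U','V','W','X','Y','Z']
        [PySem.Chars.upperChar a] := by
  unfold mapLetterA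
  dsimp only
  rw [last_match _ _ (by decide) 0 (-1)]
  show _ = PySem.Chars.find.go _ _ 0
  rw [find_go_singleton]
  simp

-- A's loop, characterised: with n ≠ 0 the flush test 'len % n == 0' fires exactly at multiples of
-- |n|, so from a partial group cur (shorter than |n|) the loop produces the full |n|-chunks of
-- cur ++ map g cs, in order, with the unfinished tail in the running group.
lemma foldA_chunks (g : Char → Int) (n : Int) (hn : n ≠ 0) :
    ∀ (cs : List Char) (acc : List (List Int)) (cur : List Int), cur.length < n.natAbs →
      cs.foldl
        (fun (st : List (List Int) × List Int) letter =>
          let ngrama := st.2 ++ [g letter]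
          if PySem.Int.mod (PySem.List.len ngrama) n = 0 then (st.1 ++ [ngrama], ([] : List Int))
          else (st.1, ngrama))
        (acc, cur)
      = (acc ++ (List.range ((cur.length + cs.length) / n.natAbs)).map
            (fun j => ((cur ++ cs.map g).drop (j * n.natAbs)).take n.natAbs),
         (cur ++ cs.map g).drop ((cur.length + cs.length) / n.natAbs * n.natAbs)) := by
  have hnn : 0 < n.natAbs := Int.natAbs_pos.mpr hn
  intro cs
  induction cs with
  | nil =>
    intro acc cur hcur
    simp [Nat.div_eq_of_lt (by simpa using hcur)]
  | cons c cs ih =>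
    intro acc cur hcur
    simp only [List.foldl_cons]
    have hlenInt : PySem.List.len (cur ++ [g c]) = ((cur.length + 1 : Nat) : Int) := by simp
    have hmod : (PySem.Int.mod (PySem.List.len (cur ++ [g c])) n = 0)
        ↔ n.natAbs ∣ (cur.length + 1) := by
      rw [PySem.Int.mod_eq_zero_iff_dvd, hlenInt, ← Int.natAbs_dvd, Int.natCast_dvd_natCast]
    have hT : cur ++ List.map g (c :: cs) = (cur ++ [g c]) ++ cs.map g := by simp
    by_cases hfl : n.natAbs ∣ (cur.length + 1)
    · have hlen : cur.length + 1 = n.natAbs := by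
        have := Nat.le_of_dvd (by omega) hfl
        omega
      have hlen' : (cur ++ [g c]).length = n.natAbs := by simpa using hlen
      rw [if_pos (hmod.mpr hfl)]
      rw [ih (acc ++ [cur ++ [g c]]) [] (by simpa using hnn)]
      have hq : (cur.length + (c :: cs).length) / n.natAbs = cs.length / n.natAbs + 1 := by
        simp only [List.length_cons]
        rw [show cur.length + (cs.length + 1) = cs.length + n.natAbs by omega]
        exact Nat.add_div_right _ hnn
      simp only [Prod.mk.injEq, List.nil_append, List.length_nil, Nat.zero_add, hT, hq]
      constructor
      · rw [List.range_succ_eq_map, List.map_cons, List.map_map, Nat.zero_mul, List.drop_zero,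
          ← hlen', List.take_left, List.append_assoc]
        congr 1
        rw [List.cons_append, List.nil_append]
        congr 1
        apply List.map_congr_left
        intro j _
        simp only [Function.comp_apply]
        rw [Nat.succ_mul, Nat.add_comm (j * (cur ++ [g c]).length) ((cur ++ [g c]).length),
          List.drop_length_add_append]
      · rw [Nat.add_mul, Nat.one_mul, Nat.add_comm, ← hlen', List.drop_length_add_append]
    · have hlt : (cur ++ [g c]).length < n.natAbs := by
        have : cur.length + 1 ≠ n.natAbs := fun h => hfl (h ▸ dvd_refl _)
        simp only [List.length_append, List.length_cons, List.length_nil]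
        omega
      rw [if_neg (fun h => hfl (hmod.mp h))]
      rw [ih acc (cur ++ [g c]) hlt]
      have hc : (cur ++ [g c]).length + cs.length = cur.length + (c :: cs).length := by
        simp
        omega
      rw [hc, ← hT]

-- A never flushes when every reachable group length is a non-multiple of n: result unchanged.
lemma foldA_no_flush (g : Char → Int) (n : Int) :
    ∀ (cs : List Char) (acc : List (List Int)) (cur : List Int),
      (∀ k : Nat, 0 < k → k ≤ cur.length + cs.length → PySem.Int.mod (k : Int) n ≠ 0) →
      cs.foldl
        (fun (st : List (List Int) × List Int) letter =>
          let ngrama := st.2 ++ [g letter]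
          if PySem.Int.mod (PySem.List.len ngrama) n = 0 then (st.1 ++ [ngrama], ([] : List Int))
          else (st.1, ngrama))
        (acc, cur)
      = (acc, cur ++ cs.map g) := by
  intro cs
  induction cs with
  | nil => intro acc cur h; simp
  | cons c cs ih =>
    intro acc cur h
    simp only [List.foldl_cons]
    have hlenInt : PySem.List.len (cur ++ [g c]) = ((cur.length + 1 : Nat) : Int) := by simp
    rw [if_neg (by rw [hlenInt]; exact h _ (by omega) (by simp))]
    rw [ih acc (cur ++ [g c]) (by intro k hk hk2; exact h k hk (by simp at hk2 ⊢; omega))]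
    simp

-- B for n < 0 on a non-empty message: stop = len - (len % n) ≥ len > 0 while the step is
-- negative, so the range is empty and B returns [].
lemma altB_neg (message : String) (hcs : message.toList ≠ []) (n : Int) (hn : n < 0) :
    mapMessage_alt message n = [] := by
  unfold mapMessage_alt
  rw [if_neg (by simpa using hcs)]
  have hlen : (0 : Int) < (message.toList.length : Int) := by
    have := List.length_pos_iff.mpr hcs
    exact_mod_cast this
  have hstop : 0 < PySem.Int.floordiv (PySem.List.len message.toList) n * n := by
    have h1 := PySem.Int.floordiv_mul_add_mod (PySem.List.len message.toList) n
    have h2 := PySem.Int.mod_neg_bounds (a := PySem.List.len message.toList) hn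
    simp only [PySem.List.len_eq] at h1 h2 ⊢
    omega
  simp only [PySem.List.pyRange]
  rw [if_neg (by omega)]
  simp only [if_neg (by omega : ¬ (0:Int) < n)]
  rw [if_neg (by omega)]
  simp

-- B for n > 0 on a non-empty message: the index-sliced comprehension is the chunk list.
lemma altB_chunks (message : String) (hcs : message.toList ≠ []) (nn : Nat) (hn : 0 < nn) :
    mapMessage_alt message (nn : Int)
      = (List.range (message.toList.length / nn)).map
          (fun j => ((message.toList.map (fun c =>
              PySem.Chars.find
                ['A','B','C','D','E','F','G','H','I','J','K','L','M','N','Ñ','O','P','Q','R','S','T','U','V','W','X','Y','Z']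
                [PySem.Chars.upperChar c])).drop (j * nn)).take nn) := by
  have hpos : (0 : Int) < (nn : Int) := by exact_mod_cast hn
  unfold mapMessage_alt
  rw [if_neg (by simpa using hcs)]
  have hq : PySem.Int.floordiv (PySem.List.len message.toList) (nn : Int) * (nn : Int)
      = ((message.toList.length / nn * nn : Nat) : Int) := by
    simp only [PySem.List.len_eq]
    rw [PySem.Int.floordiv_natCast]
    push_cast
    ring
  dsimp only
  rw [hq]
  set q := message.toList.length / nn with hqdef
  have hcnt : (if (0:Int) < ((q * nn : Nat) : Int) then
      ((((q * nn : Nat) : Int) - 0 + (nn:Int) - 1) / (nn:Int)).toNat else 0) = q := by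
    by_cases h0 : 0 < q
    · rw [if_pos (by push_cast; positivity)]
      have h1 : (((q * nn : Nat) : Int) - 0 + (nn:Int) - 1) = ((nn:Int) - 1) + (q:Int) * (nn:Int) := by
        push_cast; ring
      have hn1 : (1:Int) ≤ (nn:Int) := by exact_mod_cast hn
      have h2 : ((nn:Int) - 1) / (nn:Int) = 0 :=
        Int.ediv_eq_zero_of_lt (by linarith) (by linarith)
      rw [h1, Int.add_mul_ediv_right _ _ (by positivity : (nn:Int) ≠ 0), h2]
      simp
    · have hq0 : q = 0 := Nat.le_zero.mp (not_lt.mp h0)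
      rw [hq0]
      norm_num
  rw [PySem.List.pyRange_of_pos _ _ hpos, hcnt, List.map_map]
  apply List.map_congr_left
  intro k hk
  simp only [Function.comp_apply, zero_add]
  have harg2 : ((nn : Int) * (k : Int) + (nn : Int)) = ((k * nn : Nat) : Int) + ((nn : Nat) : Int) := by
    push_cast; ring
  have harg : ((nn : Int) * (k : Int)) = ((k * nn : Nat) : Int) := by push_cast; ring
  rw [harg2, harg, PySem.List.slice_natCast_add]
  rw [List.map_take, List.map_drop]

-- ===== VERDICT (by name: the statement is the Claim_ definition above) =====
theorem mapMessage_spec : Claim_unchanged_mapMessage := by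
  intro message n _hdom hpre hD
  by_cases hcs : message.toList = []
  · simp [mapMessage, mapMessage_alt, hcs]
  · have hn : n ≠ 0 := by
      rcases hpre with h | h
      · exact h
      · exact absurd h hcs
    rcases lt_trichotomy n 0 with hneg | h0 | hpos
    · have hlen : (message.toList.length : Int) < -n := by
        unfold D_mapMessage at hD
        by_contra hc
        exact hD ⟨hneg, by omega⟩
      have hA : mapMessage message n = [] := by
        unfold mapMessage
        rw [foldA_no_flush mapLetterA n message.toList [] []]
        intro k hk hk2 habs
        rw [PySem.Int.mod_eq_zero_iff_dvd] at habs
        have hdvd : -n ∣ (k : Int) := neg_dvd.mpr habs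
        have hle := Int.le_of_dvd (by exact_mod_cast hk) hdvd
        simp only [List.length_nil, Nat.zero_add] at hk2
        omega
      rw [hA, altB_neg message hcs n hneg]
    · exact absurd h0 hn
    · obtain ⟨nn, rfl⟩ : ∃ m : Nat, n = (m : Int) := ⟨n.toNat, (Int.toNat_of_nonneg hpos.le).symm⟩
      have hnn : 0 < nn := by exact_mod_cast hpos
      unfold mapMessage
      rw [foldA_chunks mapLetterA (nn : Int) hn message.toList [] []
        (by simpa using Int.natAbs_pos.mpr hn)]
      simp only [Int.natAbs_natCast, List.nil_append, List.length_nil, Nat.zero_add]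
      rw [altB_chunks message hcs nn hnn]
      have hmapeq : message.toList.map mapLetterA
          = message.toList.map (fun c =>
              PySem.Chars.find
                ['A','B','C','D','E','F','G','H','I','J','K','L','M','N','Ñ','O','P','Q','R','S','T','U','V','W','X','Y','Z']
                [PySem.Chars.upperChar c]) :=
        List.map_congr_left (fun c _ => mapLetter_eq_find c)
      rw [hmapeq]

theorem mapMessage_changed : Claim_changed_mapMessage := by
  unfold Claim_changed_mapMessage; decide

theorem mapMessage_tight : Claim_exact_mapMessage := by
  intro message n _hdom _hpre hd
  obtain ⟨hneg, hlen⟩ := hd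
  have hcs : message.toList ≠ [] := by
    intro h
    rw [h] at hlen
    simp at hlen
    omega
  rw [altB_neg message hcs n hneg]
  unfold mapMessage
  rw [foldA_chunks mapLetterA n hneg.ne message.toList [] []
    (by simpa using Int.natAbs_pos.mpr hneg.ne)]
  simp only [List.nil_append, List.length_nil, Nat.zero_add]
  have hq : 0 < message.toList.length / n.natAbs :=
    Nat.div_pos (by omega) (Int.natAbs_pos.mpr hneg.ne)
  simp only [ne_eq, List.map_eq_nil_iff, List.range_eq_nil]
  omega
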